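-- pv_equiv track=rewrite | github.com/Runsheng/trackcluster | trackcluster/track.py | get_intron
-- ===== SOURCE A (Python) =====
-- def get_intron(line_exon):
--     line_intron=[]
--     for n, pair in enumerate(line_exon):
--         start, end=pair
--         if n==0:
--             pass
--         else:
--             line_intron.append((end_p, start))
--         if n==len(line_exon):
--             break
--         start_p, end_p=pair
--     return line_intron
-- ===== SOURCE B (Python) =====
-- def get_intron(line_exon):
--     coords = [c for pair in line_exon for c in pair]
--     interior = coords[1:-1]
--     it = iter(interior)
--     return list(zip(it, it))
-- ===== Notes on version B (the rewrite author's own statement) =====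
-- stated objective: idiomatic
-- what changed: Instead of an enumerate loop carrying the previous exon's end, B flattens all exon boundaries into one coordinate list, strips the two outer endpoints, and re-chunks the interior boundaries pairwise via list(zip(it, it)).
import Mathlib
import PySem

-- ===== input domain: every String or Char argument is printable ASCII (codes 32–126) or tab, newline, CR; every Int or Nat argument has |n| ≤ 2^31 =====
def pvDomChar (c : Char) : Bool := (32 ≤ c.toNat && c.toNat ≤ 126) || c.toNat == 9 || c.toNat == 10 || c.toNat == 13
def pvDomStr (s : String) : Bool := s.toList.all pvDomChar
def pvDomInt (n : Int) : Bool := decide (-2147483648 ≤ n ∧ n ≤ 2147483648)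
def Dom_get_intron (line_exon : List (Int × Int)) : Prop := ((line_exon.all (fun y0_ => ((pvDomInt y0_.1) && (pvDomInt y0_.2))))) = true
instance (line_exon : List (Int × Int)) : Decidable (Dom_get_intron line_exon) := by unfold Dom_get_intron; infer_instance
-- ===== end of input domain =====

-- B replaces A's stateful enumerate loop by a different algorithm: flatten all exon
-- boundaries into one coordinate list, strip the outer two endpoints, and re-chunk
-- the interior boundaries into pairs (idiomatic; same O(n) cost).

-- ===== PORT A =====
-- A's loop over enumerate(line_exon) with state (line_intron, end_p); end_p starts
-- unset in Python (never read at n=0), modelled by an arbitrary initial 0.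
-- The `if n==len(line_exon): break` branch never fires (n < len) and is ported as-is.
def get_intron (line_exon : List (Int × Int)) : List (Int × Int) :=
  (PySem.List.enumerate line_exon 0 |>.foldl
    (fun (st : List (Int × Int) × Int) npair =>
      let n := npair.1
      let pair := npair.2
      let acc := if n == 0 then st.1
                 else st.1 ++ [(st.2, pair.1)]
      if n == (line_exon.length : Int) then (acc, st.2)
      else (acc, pair.2))
    ([], 0)).1

-- ===== PORT B =====
-- list(zip(it, it)) over one iterator: consume the interior list two at a time.
def pvChunk2 : List Int → List (Int × Int)
  | a :: b :: rest => (a, b) :: pvChunk2 rest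
  | _ => []

def get_intron_alt (line_exon : List (Int × Int)) : List (Int × Int) :=
  let coords := line_exon.flatMap (fun p => [p.1, p.2])
  let interior := PySem.List.slice coords (some 1) (some (-1))
  pvChunk2 interior

-- ===== PRECONDITION & SPEC =====
def Spec_get_intron (line_exon : List (Int × Int)) (out : List (Int × Int)) : Prop := out = get_intron_alt line_exon
instance (line_exon : List (Int × Int)) (out : List (Int × Int)) : Decidable (Spec_get_intron line_exon out) := by unfold Spec_get_intron; infer_instance

-- ===== CLAIM (what is proved, stated in full; the proofs are below) =====
def Claim_equal_get_intron : Prop := ∀ (line_exon : List (Int × Int)), Dom_get_intron line_exon → Spec_get_intron line_exon (get_intron line_exon)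

-- ===== LEMMAS AND PROOFS =====

-- xs[1:-1] strips the first and last element.
theorem slice_one_negone (xs : List Int) :
    PySem.List.slice xs (some 1) (some (-1)) = xs.tail.dropLast := by
  cases xs with
  | nil => rfl
  | cons a l =>
    simp [PySem.List.slice, List.dropLast_eq_take]

-- The tail of A's fold (indices ≥ 1) appends one intron per element, threading end_p.
theorem get_intron_fold_aux (full : List (Int × Int)) (xs : List (Int × Int))
    (i : Int) (hi : 0 < i) (hlen : ∀ p ∈ PySem.List.enumerate xs i, p.1 ≠ (full.length : Int))
    (acc : List (Int × Int)) (e : Int) :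
    ((PySem.List.enumerate xs i).foldl
      (fun (st : List (Int × Int) × Int) npair =>
        if npair.1 == (full.length : Int) then
          (if npair.1 == 0 then st.1 else st.1 ++ [(st.2, npair.2.1)], st.2)
        else (if npair.1 == 0 then st.1 else st.1 ++ [(st.2, npair.2.1)], npair.2.2))
      (acc, e)).1
    = acc ++ (((e, e) :: xs).zip xs).map (fun pq => (pq.1.2, pq.2.1)) := by
  induction xs generalizing i acc e with
  | nil => simp [PySem.List.enumerate_nil]
  | cons p rest ih =>
    rw [PySem.List.enumerate_cons]
    simp only [List.foldl_cons]
    have h0 : (i == (0:Int)) = false := by simp; omega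
    have hL : (i == (full.length : Int)) = false := by
      have := hlen (i, p) (by rw [PySem.List.enumerate_cons]; exact List.mem_cons_self)
      simpa using this
    simp only [h0, hL, Bool.false_eq_true, if_false]
    rw [ih (i+1) (by omega)
      (by intro q hq; exact hlen q (by rw [PySem.List.enumerate_cons]; exact List.mem_cons_of_mem _ hq))]
    cases rest with
    | nil => simp
    | cons q rs => simp

-- A equals the adjacent-pair form.
theorem get_intron_eq_zip (line_exon : List (Int × Int)) :
    get_intron line_exon
      = (line_exon.zip line_exon.tail).map (fun pq => (pq.1.2, pq.2.1)) := by
  cases line_exon with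
  | nil => rfl
  | cons p rest =>
    unfold get_intron
    rw [PySem.List.enumerate_cons]
    simp only [List.foldl_cons]
    have hne : ((0:Int) == ((p :: rest).length : Int)) = false := by
      simp; omega
    simp only [hne, beq_self_eq_true, if_true, Bool.false_eq_true, if_false, List.nil_append]
    rw [get_intron_fold_aux (p :: rest) rest (0+1) (by norm_num)
      (by intro q hq
          rw [PySem.List.mem_enumerate_iff] at hq
          obtain ⟨k, hk, rfl⟩ := hq
          simp; omega)]
    cases rest with
    | nil => simp
    | cons q rs => simp

-- B equals the adjacent-pair form.
theorem get_intron_alt_eq_zip (line_exon : List (Int × Int)) :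
    get_intron_alt line_exon
      = (line_exon.zip line_exon.tail).map (fun pq => (pq.1.2, pq.2.1)) := by
  show pvChunk2 (PySem.List.slice (line_exon.flatMap (fun p => [p.1, p.2])) (some 1) (some (-1))) = _
  rw [slice_one_negone]
  induction line_exon with
  | nil => rfl
  | cons p rest ih =>
    cases rest with
    | nil => rfl
    | cons q rs =>
      simp only [List.flatMap_cons, List.cons_append, List.tail_cons, List.nil_append] at ih ⊢
      rw [List.dropLast_cons₂, List.dropLast_cons₂, pvChunk2]
      rw [ih]
      simp

-- ===== VERDICT (by name: the statement is the Claim_ definition above) =====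
theorem get_intron_spec : Claim_equal_get_intron := by
  intro xs _
  unfold Spec_get_intron
  exact (get_intron_eq_zip xs).trans (get_intron_alt_eq_zip xs).symm
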